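-- pv_equiv track=rewrite | github.com/pushjob/usersarticles | TrackingEventLogDataCleaner.py | _get_required_params_set
-- ===== SOURCE A (Python) =====
-- request_required_params = ["a", "c"]
--
-- def _get_required_params_set(x):
--     d = dict.fromkeys(request_required_params)
--     for kv in x:
--         k, v = kv.split("=")
--         if k in d:
--             d[k] = v
--
--     r = []
--     for x in request_required_params:
--         r.append(d[x])
--     return r
-- ===== SOURCE B (Python) =====
-- request_required_params = ["a", "c"]
--
-- def _get_required_params_set(x):
--     # Per-key scans over the materialized input; last occurrence wins, None if absent.
--     items = list(x)
--     result = []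
--     for key in request_required_params:
--         found = None
--         for kv in items:
--             k, v = kv.split("=")
--             if k == key:
--                 found = v
--         result.append(found)
--     return result
-- ===== Notes on version B (the rewrite author's own statement) =====
-- stated objective: alternative
-- what changed: Replaces A's single-pass dict-building (fromkeys, update-on-membership, then lookup loop) with a per-required-key scan of the materialized input keeping the last matching value, so no dict is maintained.
import Mathlib
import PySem

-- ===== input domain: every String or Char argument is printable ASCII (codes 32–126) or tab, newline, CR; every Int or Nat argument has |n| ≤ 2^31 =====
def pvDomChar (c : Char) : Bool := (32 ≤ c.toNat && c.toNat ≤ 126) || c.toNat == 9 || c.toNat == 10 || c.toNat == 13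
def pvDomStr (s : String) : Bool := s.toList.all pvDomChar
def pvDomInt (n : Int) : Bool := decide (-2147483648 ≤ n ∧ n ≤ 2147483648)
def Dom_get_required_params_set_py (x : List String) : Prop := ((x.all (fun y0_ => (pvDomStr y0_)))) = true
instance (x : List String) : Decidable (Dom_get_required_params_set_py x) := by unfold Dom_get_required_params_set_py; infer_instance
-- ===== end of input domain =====

-- ===== PORT A =====
-- B changes the decomposition: per-required-key scans instead of A's dict index; same values.
def pvReqParams : List String := ["a", "c"]

def pvStepA (d : PySem.Dict String (Option String)) (kv : String) : PySem.Dict String (Option String) :=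
  match PySem.Str.split? kv "=" with
  | some [k, v] => if d.contains k then d.insert k (some v) else d
  | _ => d   -- Python raises ValueError here (unpack mismatch); excluded by Pre_

def get_required_params_set_py (x : List String) : List (Option String) :=
  let d0 : PySem.Dict String (Option String) :=
    pvReqParams.foldl (fun d k => d.insert k none) PySem.Dict.empty
  let d := x.foldl pvStepA d0
  pvReqParams.foldl (fun r k => r ++ [d.getD k none]) []

-- ===== PORT B =====
def pvScanStepB (key : String) (found : Option String) (kv : String) : Option String :=
  match PySem.Str.split? kv "=" with
  | some [k, v] => if k == key then some v else found
  | _ => found   -- Python raises ValueError here; excluded by Pre_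

def pvScanB (key : String) (items : List String) : Option String :=
  items.foldl (pvScanStepB key) none

def get_required_params_set_py_alt (x : List String) : List (Option String) :=
  pvReqParams.map (fun key => pvScanB key x)

-- ===== PRECONDITION & SPEC =====
-- Pre_ excludes inputs containing an element that does not split on "=" into exactly
-- two parts: there Python's "k, v = kv.split(\"=\")" raises ValueError in both A and B.
def Pre_get_required_params_set_py (x : List String) : Prop :=
  ∀ s ∈ x, ((PySem.Str.split? s "=").getD []).length = 2
instance (x : List String) : Decidable (Pre_get_required_params_set_py x) := by unfold Pre_get_required_params_set_py; infer_instance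
def pvWitness_get_required_params_set_py : List String := ["a=1", "b=2", "a=3"]

def Spec_get_required_params_set_py (x : List String) (out : List (Option String)) : Prop := out = get_required_params_set_py_alt x
instance (x : List String) (out : List (Option String)) : Decidable (Spec_get_required_params_set_py x out) := by unfold Spec_get_required_params_set_py; infer_instance

-- ===== CLAIM (what is proved, stated in full; the proofs are below) =====
def Claim_equal_get_required_params_set_py : Prop := ∀ (x : List String), Dom_get_required_params_set_py x → Pre_get_required_params_set_py x → Spec_get_required_params_set_py x (get_required_params_set_py x)

-- ===== LEMMAS AND PROOFS =====
-- Invariant: for any key q present in the dict, the dict entry after A's fold equals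
-- B's last-match scan started from the current entry.
lemma pv_key_lemma (x : List String)
    (hx : ∀ s ∈ x, ((PySem.Str.split? s "=").getD []).length = 2)
    (d : PySem.Dict String (Option String)) (q : String) (hq : d.contains q = true) :
    (x.foldl pvStepA d).getD q none = x.foldl (pvScanStepB q) (d.getD q none) := by
  induction x generalizing d with
  | nil => rfl
  | cons s xs ih =>
    have hs := hx s (by simp)
    obtain ⟨k, v, hkv⟩ : ∃ k v, PySem.Str.split? s "=" = some [k, v] := by
      match h : PySem.Str.split? s "=" with
      | some [k, v] => exact ⟨k, v, rfl⟩
      | none => rw [h] at hs; simp at hs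
      | some [] => rw [h] at hs; simp at hs
      | some [_] => rw [h] at hs; simp at hs
      | some (_ :: _ :: _ :: _) => rw [h] at hs; simp at hs
    have hx' : ∀ t ∈ xs, ((PySem.Str.split? t "=").getD []).length = 2 := fun t ht => hx t (by simp [ht])
    simp only [List.foldl_cons]
    by_cases hc : d.contains k = true
    · have hstep : pvStepA d s = d.insert k (some v) := by simp [pvStepA, hkv, hc]
      rw [hstep, ih hx' _ (by simp [PySem.Dict.contains_insert, hq])]
      congr 1
      rw [PySem.Dict.getD_insert]
      simp only [pvScanStepB, hkv]
      by_cases hqk : q = k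
      · simp [hqk]
      · simp [hqk, beq_eq_false_iff_ne.mpr (Ne.symm hqk)]
    · have hkq : (k == q) = false := by
        refine beq_eq_false_iff_ne.mpr ?_
        intro h; rw [h] at hc; exact hc hq
      have hstep : pvStepA d s = d := by simp [pvStepA, hkv, hc]
      rw [hstep, ih hx' d hq]
      congr 1
      simp [pvScanStepB, hkv, hkq]

-- ===== VERDICT (by name: the statement is the Claim_ definition above) =====
theorem get_required_params_set_py_spec : Claim_equal_get_required_params_set_py := by
  intro x _ hpre
  show _ = _
  simp only [get_required_params_set_py, get_required_params_set_py_alt, pvReqParams,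
    List.foldl_cons, List.foldl_nil, List.map_cons, List.map_nil, List.nil_append, pvScanB]
  rw [pv_key_lemma x hpre ((PySem.Dict.empty.insert "a" none).insert "c" none) "a" (by decide),
      pv_key_lemma x hpre ((PySem.Dict.empty.insert "a" none).insert "c" none) "c" (by decide)]
  rfl
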